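-- pv_equiv track=rewrite | github.com/Jayco345BHS/FinGlass | core/market_data.py | _canonical_symbol
-- ===== SOURCE A (Python) =====
-- SYMBOL_SUFFIXES = (".TO", ".TRT", ".V", ".NE")
--
-- def _canonical_symbol(symbol):
--     raw = str(symbol or "").strip().upper()
--     if not raw:
--         return ""
--     for suffix in SYMBOL_SUFFIXES:
--         if raw.endswith(suffix) and len(raw) > len(suffix):
--             return raw[: -len(suffix)]
--     return raw
-- ===== SOURCE B (Python) =====
-- SUFFIX_SET = {".TO", ".TRT", ".V", ".NE"}
--
-- def _canonical_symbol(symbol):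
--     raw = str(symbol or "").strip().upper()
--     base, sep, tail = raw.rpartition(".")
--     if sep and base and ("." + tail) in SUFFIX_SET:
--         return base
--     return raw
-- ===== Notes on version B (the rewrite author's own statement) =====
-- stated objective: idiomatic
-- what changed: Replaces the loop over all suffixes with endswith/length checks by a single rpartition at the last dot that isolates the one trailing segment, followed by one set-membership test and a non-empty-base check (correct because no suffix contains an internal dot).
import Mathlib
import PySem

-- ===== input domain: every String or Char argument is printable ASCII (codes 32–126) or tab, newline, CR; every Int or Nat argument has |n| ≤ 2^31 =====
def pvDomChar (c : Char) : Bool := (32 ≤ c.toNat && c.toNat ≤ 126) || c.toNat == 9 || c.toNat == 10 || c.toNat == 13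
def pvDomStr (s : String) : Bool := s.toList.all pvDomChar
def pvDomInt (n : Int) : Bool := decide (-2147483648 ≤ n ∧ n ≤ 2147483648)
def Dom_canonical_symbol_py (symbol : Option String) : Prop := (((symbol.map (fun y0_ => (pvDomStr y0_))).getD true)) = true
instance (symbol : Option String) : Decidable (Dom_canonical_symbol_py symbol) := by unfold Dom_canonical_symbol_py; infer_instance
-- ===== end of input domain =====

-- B replaces A's suffix loop by one rpartition at the last dot + set lookup; equivalence proved for all inputs (both total).

-- ===== PORT A =====
def pySuffixes : List String := [".TO", ".TRT", ".V", ".NE"]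

-- the 'for suffix in SYMBOL_SUFFIXES' loop of A
def canonSuffixLoop (raw : String) : List String → String
  | [] => raw
  | suffix :: rest =>
    if PySem.Str.endswith raw suffix && decide (PySem.Str.len suffix < PySem.Str.len raw)
    then PySem.Str.slice raw none (some (-(PySem.Str.len suffix)))
    else canonSuffixLoop raw rest

def canonical_symbol_py (symbol : Option String) : String :=
  let raw := PySem.Str.upper (PySem.Str.strip (symbol.getD ""))
  if raw = "" then "" else canonSuffixLoop raw pySuffixes

-- ===== PORT B =====
-- Python set literal {".TO", ".TRT", ".V", ".NE"}
def pySuffixSet : PySem.Set String := PySem.Set.ofList [".TO", ".TRT", ".V", ".NE"]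

-- hand port of str.rpartition(".") (PySem has no rpartition): scan the reversed
-- character list for the first '.' (= last '.' of the string), accumulating the
-- tail; exact for the one-character separator ".".  'none' plays the role of
-- Python's empty sep (no '.' found).
def rpartitionDotGo : List Char → List Char → Option (List Char × List Char)
  | [], _ => none
  | c :: rest, acc => if c = '.' then some (rest, acc) else rpartitionDotGo rest (c :: acc)

def rpartitionDot (l : List Char) : Option (List Char × List Char) :=
  match rpartitionDotGo l.reverse [] with
  | none => none
  | some (brev, tail) => some (brev.reverse, tail)

-- the 'if sep and base and ... in SUFFIX_SET' dispatch of B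
def canonDispatch (raw : String) : String :=
  match rpartitionDot raw.toList with
  | none => raw            -- sep == "": no '.' in raw (also covers raw == "")
  | some (base, tail) =>
    if !base.isEmpty && pySuffixSet.contains (String.ofList ('.' :: tail))
    then String.ofList base
    else raw

def canonical_symbol_py_alt (symbol : Option String) : String :=
  let raw := PySem.Str.upper (PySem.Str.strip (symbol.getD ""))
  canonDispatch raw

-- ===== PRECONDITION & SPEC =====
def Spec_canonical_symbol_py (symbol : Option String) (out : String) : Prop := out = canonical_symbol_py_alt symbol
instance (symbol : Option String) (out : String) : Decidable (Spec_canonical_symbol_py symbol out) := by unfold Spec_canonical_symbol_py; infer_instance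

-- ===== CLAIM (what is proved, stated in full; the proofs are below) =====
def Claim_equal_canonical_symbol_py : Prop := ∀ (symbol : Option String), Dom_canonical_symbol_py symbol → Spec_canonical_symbol_py symbol (canonical_symbol_py symbol)

-- ===== LEMMAS AND PROOFS =====

-- a dot-free-prefix decomposition at a '.' is unique
theorem firstDot_uniq (x₁ : List Char) : ∀ (x₂ y₁ y₂ : List Char), '.' ∉ x₁ → '.' ∉ x₂ →
    x₁ ++ '.' :: y₁ = x₂ ++ '.' :: y₂ → x₁ = x₂ ∧ y₁ = y₂ := by
  induction x₁ with
  | nil =>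
    intro x₂ y₁ y₂ _ h₂ h
    cases x₂ with
    | nil => simpa using h
    | cons d x₂' =>
      simp only [List.nil_append, List.cons_append, List.cons.injEq] at h
      exact absurd (List.mem_cons_self ..) (h.1 ▸ h₂)
  | cons c x₁' ih =>
    intro x₂ y₁ y₂ h₁ h₂ h
    cases x₂ with
    | nil =>
      simp only [List.cons_append, List.nil_append, List.cons.injEq] at h
      exact absurd (List.mem_cons_self ..) (h.1.symm ▸ h₁)
    | cons d x₂' =>
      simp only [List.cons_append, List.cons.injEq] at h
      have := ih x₂' y₁ y₂ (fun hm => h₁ (List.mem_cons_of_mem _ hm))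
        (fun hm => h₂ (List.mem_cons_of_mem _ hm)) h.2
      exact ⟨by simp [h.1, this.1], this.2⟩

-- a dot-free-tail decomposition at a '.' is unique
theorem lastDot_uniq (b₁ t₁ b₂ t₂ : List Char) (h₁ : '.' ∉ t₁) (h₂ : '.' ∉ t₂)
    (h : b₁ ++ '.' :: t₁ = b₂ ++ '.' :: t₂) : b₁ = b₂ ∧ t₁ = t₂ := by
  have hr := congrArg List.reverse h
  have e₁ : (b₁ ++ '.' :: t₁).reverse = t₁.reverse ++ '.' :: b₁.reverse := by simp
  have e₂ : (b₂ ++ '.' :: t₂).reverse = t₂.reverse ++ '.' :: b₂.reverse := by simp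
  rw [e₁, e₂] at hr
  have := firstDot_uniq t₁.reverse t₂.reverse b₁.reverse b₂.reverse
    (by simpa using h₁) (by simpa using h₂) hr
  exact ⟨List.reverse_injective this.2, List.reverse_injective this.1⟩

theorem rpartitionDotGo_none (rev acc : List Char) (h : rpartitionDotGo rev acc = none) :
    '.' ∉ rev := by
  induction rev generalizing acc with
  | nil => simp
  | cons c rest ih =>
    simp only [rpartitionDotGo] at h
    by_cases hc : c = '.'
    · simp [hc] at h
    · simp only [if_neg hc] at h
      intro hm
      rcases List.mem_cons.mp hm with h1 | h1
      · exact hc h1.symm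
      · exact ih _ h h1

theorem rpartitionDotGo_some (rev acc brev tail : List Char)
    (h : rpartitionDotGo rev acc = some (brev, tail)) :
    ∃ pre, rev = pre ++ '.' :: brev ∧ '.' ∉ pre ∧ tail = pre.reverse ++ acc := by
  induction rev generalizing acc with
  | nil => simp [rpartitionDotGo] at h
  | cons c rest ih =>
    simp only [rpartitionDotGo] at h
    by_cases hc : c = '.'
    · simp only [if_pos hc] at h
      obtain ⟨h1, h2⟩ := Prod.mk.injEq .. ▸ (Option.some.injEq .. ▸ h)
      exact ⟨[], by simp [hc, h1], by simp, by simp [h2]⟩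
    · simp only [if_neg hc] at h
      obtain ⟨pre, hrev, hpre, htail⟩ := ih _ h
      refine ⟨c :: pre, by simp [hrev], ?_, by simp [htail]⟩
      intro hm
      rcases List.mem_cons.mp hm with h1 | h1
      · exact hc h1.symm
      · exact hpre h1

theorem rpartitionDot_none (l : List Char) (h : rpartitionDot l = none) : '.' ∉ l := by
  unfold rpartitionDot at h
  rcases hg : rpartitionDotGo l.reverse [] with _ | ⟨brev, tail⟩
  · have := rpartitionDotGo_none _ _ hg
    intro hmem; exact this (List.mem_reverse.mpr hmem)
  · rw [hg] at h; simp at h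

theorem rpartitionDot_some (l base tail : List Char) (h : rpartitionDot l = some (base, tail)) :
    l = base ++ '.' :: tail ∧ '.' ∉ tail := by
  unfold rpartitionDot at h
  rcases hg : rpartitionDotGo l.reverse [] with _ | ⟨brev, t⟩
  · rw [hg] at h; simp at h
  · rw [hg] at h
    obtain ⟨pre, hrev, hpre, htail⟩ := rpartitionDotGo_some _ _ _ _ hg
    simp only [Option.some.injEq, Prod.mk.injEq] at h
    obtain ⟨hb, ht⟩ := h
    constructor
    · have : l = (pre ++ '.' :: brev).reverse := by
        rw [← hrev, List.reverse_reverse]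
      rw [this, List.reverse_append]
      simp [← hb, ← ht, htail]
    · rw [← ht, htail]
      simpa using fun hm => hpre (List.mem_reverse.mp hm)

-- endswith for a dot-free suffix against a last-dot decomposition
theorem endswith_lastDot (b t s : List Char) (ht : '.' ∉ t) (hs : '.' ∉ s) :
    ('.' :: s) <:+ (b ++ '.' :: t) ↔ s = t := by
  constructor
  · rintro ⟨u, hu⟩
    exact (lastDot_uniq u s b t hs ht hu).2
  · rintro rfl; exact ⟨b, rfl⟩

theorem endswith_no_dot (p l : List Char) (hl : '.' ∉ l) (hp : '.' ∈ p) :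
    ¬ p <:+ l := by
  rintro ⟨u, rfl⟩
  exact hl (List.mem_append.mpr (Or.inr hp))

-- x[:-k] of a string whose last k characters are known
theorem slice_eval (raw : String) (base rest : List Char) (k : Nat) (hk : 0 < k)
    (hl : raw.toList = base ++ rest) (hr : rest.length = k) :
    PySem.Str.slice raw none (some (-(k : Int))) = String.ofList base := by
  apply String.toList_injective
  rw [PySem.Str.toList_slice, String.toList_ofList]
  simp only [PySem.Chars.slice_eq_listSlice]
  rw [PySem.List.slice_to_neg_natCast _ _ hk, hl]
  have h2 : (base ++ rest).length - k = base.length := by simp [hr]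
  rw [h2, List.take_left]

-- the core equivalence: A's suffix loop agrees with B's rpartition dispatch
theorem key (raw : String) :
    (if raw = "" then "" else canonSuffixLoop raw pySuffixes) = canonDispatch raw := by
  unfold canonDispatch
  rcases h : rpartitionDot raw.toList with _ | ⟨base, tail⟩
  · -- no '.' in raw: both return raw
    have hd := rpartitionDot_none _ h
    by_cases he : raw = ""
    · simp [he]
    · rw [if_neg he]
      have hf : ∀ p : List Char, '.' ∈ p → PySem.Chars.endswith raw.toList p = false := by
        intro p hp
        rw [Bool.eq_false_iff]
        intro hc
        rw [PySem.Chars.endswith_iff] at hc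
        exact endswith_no_dot _ _ hd hp hc
      simp [pySuffixes, canonSuffixLoop, hf ['.', 'T', 'O'] (by decide),
        hf ['.', 'T', 'R', 'T'] (by decide), hf ['.', 'V'] (by decide),
        hf ['.', 'N', 'E'] (by decide)]
  · obtain ⟨hl, ht⟩ := rpartitionDot_some _ _ _ h
    have hne : raw ≠ "" := by
      intro he
      have h0 : raw.toList = [] := by simp [he]
      rw [hl] at h0; simp at h0
    rw [if_neg hne]
    have hends : ∀ s : List Char, '.' ∉ s →
        (PySem.Chars.endswith raw.toList ('.' :: s) = true ↔ s = tail) := by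
      intro s hs
      rw [PySem.Chars.endswith_iff, hl]
      exact endswith_lastDot base tail s ht hs
    have hendsf : ∀ s : List Char, '.' ∉ s → s ≠ tail →
        PySem.Chars.endswith raw.toList ('.' :: s) = false := by
      intro s hs hn
      rw [Bool.eq_false_iff]
      intro hc
      exact hn ((hends s hs).mp hc)
    by_cases h1 : tail = ['T', 'O']
    · subst h1
      have e1 : PySem.Chars.endswith raw.toList ['.', 'T', 'O'] = true :=
        (hends ['T', 'O'] (by decide)).mpr rfl
      have hLn : raw.length = base.length + 3 := by
        have h' := congrArg List.length hl; simp at h'; omega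
      by_cases hb : base = []
      · subst hb
        simp only [List.length_nil, Nat.zero_add] at hLn
        have e2 := hendsf ['T', 'R', 'T'] (by decide) (by decide)
        have e3 := hendsf ['V'] (by decide) (by decide)
        have e4 := hendsf ['N', 'E'] (by decide) (by decide)
        have hL : ¬ (3 < raw.length) := by omega
        simp [pySuffixes, canonSuffixLoop, e1, e2, e3, e4, hL]
      · have hbl : 0 < base.length := List.length_pos_iff.mpr hb
        have hL : 3 < raw.length := by omega
        have e5 := slice_eval raw base ('.' :: ['T', 'O']) 3 (by norm_num) hl rfl
        norm_num at e5
        have hcont : (String.ofList ['.', 'T', 'O']) ∈ pySuffixSet := by decide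
        simp [pySuffixes, canonSuffixLoop, e1, hL, e5, hcont, hb]
    · by_cases h2 : tail = ['T', 'R', 'T']
      · subst h2
        have e1 := hendsf ['T', 'O'] (by decide) (by decide)
        have e2 : PySem.Chars.endswith raw.toList ['.', 'T', 'R', 'T'] = true :=
          (hends ['T', 'R', 'T'] (by decide)).mpr rfl
        have hLn : raw.length = base.length + 4 := by
          have h' := congrArg List.length hl; simp at h'; omega
        by_cases hb : base = []
        · subst hb
          simp only [List.length_nil, Nat.zero_add] at hLn
          have e3 := hendsf ['V'] (by decide) (by decide)
          have e4 := hendsf ['N', 'E'] (by decide) (by decide)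
          have hL : ¬ (4 < raw.length) := by omega
          simp [pySuffixes, canonSuffixLoop, e1, e2, e3, e4, hL]
        · have hbl : 0 < base.length := List.length_pos_iff.mpr hb
          have hL : 4 < raw.length := by omega
          have e5 := slice_eval raw base ('.' :: ['T', 'R', 'T']) 4 (by norm_num) hl rfl
          norm_num at e5
          have hcont : (String.ofList ['.', 'T', 'R', 'T']) ∈ pySuffixSet := by decide
          simp [pySuffixes, canonSuffixLoop, e1, e2, hL, e5, hcont, hb]
      · by_cases h3 : tail = ['V']
        · subst h3
          have e1 := hendsf ['T', 'O'] (by decide) (by decide)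
          have e2 := hendsf ['T', 'R', 'T'] (by decide) (by decide)
          have e3 : PySem.Chars.endswith raw.toList ['.', 'V'] = true :=
            (hends ['V'] (by decide)).mpr rfl
          have hLn : raw.length = base.length + 2 := by
            have h' := congrArg List.length hl; simp at h'; omega
          by_cases hb : base = []
          · subst hb
            simp only [List.length_nil, Nat.zero_add] at hLn
            have e4 := hendsf ['N', 'E'] (by decide) (by decide)
            have hL : ¬ (2 < raw.length) := by omega
            simp [pySuffixes, canonSuffixLoop, e1, e2, e3, e4, hL]
          · have hbl : 0 < base.length := List.length_pos_iff.mpr hb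
            have hL : 2 < raw.length := by omega
            have e5 := slice_eval raw base ('.' :: ['V']) 2 (by norm_num) hl rfl
            norm_num at e5
            have hcont : (String.ofList ['.', 'V']) ∈ pySuffixSet := by decide
            simp [pySuffixes, canonSuffixLoop, e1, e2, e3, hL, e5, hcont, hb]
        · by_cases h4 : tail = ['N', 'E']
          · subst h4
            have e1 := hendsf ['T', 'O'] (by decide) (by decide)
            have e2 := hendsf ['T', 'R', 'T'] (by decide) (by decide)
            have e3 := hendsf ['V'] (by decide) (by decide)
            have e4 : PySem.Chars.endswith raw.toList ['.', 'N', 'E'] = true :=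
              (hends ['N', 'E'] (by decide)).mpr rfl
            have hLn : raw.length = base.length + 3 := by
              have h' := congrArg List.length hl; simp at h'; omega
            by_cases hb : base = []
            · subst hb
              simp only [List.length_nil, Nat.zero_add] at hLn
              have hL : ¬ (3 < raw.length) := by omega
              simp [pySuffixes, canonSuffixLoop, e1, e2, e3, e4, hL]
            · have hbl : 0 < base.length := List.length_pos_iff.mpr hb
              have hL : 3 < raw.length := by omega
              have e5 := slice_eval raw base ('.' :: ['N', 'E']) 3 (by norm_num) hl rfl
              norm_num at e5
              have hcont : (String.ofList ['.', 'N', 'E']) ∈ pySuffixSet := by decide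
              simp [pySuffixes, canonSuffixLoop, e1, e2, e3, e4, hL, e5, hcont, hb]
          · -- tail is not one of the four suffix segments: both return raw
            have e1 := hendsf ['T', 'O'] (by decide) (fun he => h1 he.symm)
            have e2 := hendsf ['T', 'R', 'T'] (by decide) (fun he => h2 he.symm)
            have e3 := hendsf ['V'] (by decide) (fun he => h3 he.symm)
            have e4 := hendsf ['N', 'E'] (by decide) (fun he => h4 he.symm)
            have hcont : (String.ofList ('.' :: tail)) ∉ pySuffixSet := by
              intro hc
              simp [pySuffixSet, PySem.Set.ofList] at hc
              rcases hc with hc | hc | hc | hc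
              · apply h1
                have h' := congrArg String.toList hc
                rw [String.toList_ofList,
                  show (".TO" : String).toList = ['.', 'T', 'O'] from by decide] at h'
                simpa using h'
              · apply h2
                have h' := congrArg String.toList hc
                rw [String.toList_ofList,
                  show (".TRT" : String).toList = ['.', 'T', 'R', 'T'] from by decide] at h'
                simpa using h'
              · apply h3
                have h' := congrArg String.toList hc
                rw [String.toList_ofList,
                  show (".V" : String).toList = ['.', 'V'] from by decide] at h'
                simpa using h'
              · apply h4
                have h' := congrArg String.toList hc
                rw [String.toList_ofList,
                  show (".NE" : String).toList = ['.', 'N', 'E'] from by decide] at h'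
                simpa using h'
            simp [pySuffixes, canonSuffixLoop, e1, e2, e3, e4, hcont]

-- ===== VERDICT (by name: the statement is the Claim_ definition above) =====
theorem canonical_symbol_py_spec : Claim_equal_canonical_symbol_py := by
  intro symbol _
  exact key (PySem.Str.upper (PySem.Str.strip (symbol.getD "")))
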